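-- pv_equiv track=rewrite | github.com/dannym49/CalPoly-CPE101-Project4 | funcs.py | checkBackward
-- ===== SOURCE A (Python) =====
-- def flipString(userInput):
--     reverse = userInput[::-1]
--     return reverse
--
-- def checkBackward(inputString, word):
--     reverse = flipString(word)
--     puzzle = []
--     res = ""
--     for i in range(10):
--         puzzle.append(inputString[10 * i:(10 * i) + 10])
--     for row in range(len(puzzle)):
--         if (puzzle[row].find(reverse)) > -1:
--             col = puzzle[row].find(reverse)
--             res = "%s: %s row: %s column: %s" % (word, '(BACKWARD)', row, col + len(reverse) - 1)
--             return res
--     return None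
-- ===== SOURCE B (Python) =====
-- def checkBackward(inputString, word):
--     n = len(word)
--     limit = min(len(inputString), 100)
--     for j in range(limit):
--         row = j // 10
--         if 10 * row + n <= j + 1 and all(inputString[j - k] == word[k] for k in range(n)):
--             return "%s: %s row: %s column: %s" % (word, '(BACKWARD)', row, j - 10 * row)
--     return None
-- ===== Notes on version B (the rewrite author's own statement) =====
-- stated objective: alternative
-- what changed: Replaced reverse-the-word + precomputed row slices + per-row str.find by a single flat scan over string indices that matches the (unreversed) word characters right-to-left in place, deriving row and column from the index.
-- outside the precondition, e.g. on checkBackward('', ''): A returns ': (BACKWARD) row: 0 column: -1', B returns None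
import Mathlib
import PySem

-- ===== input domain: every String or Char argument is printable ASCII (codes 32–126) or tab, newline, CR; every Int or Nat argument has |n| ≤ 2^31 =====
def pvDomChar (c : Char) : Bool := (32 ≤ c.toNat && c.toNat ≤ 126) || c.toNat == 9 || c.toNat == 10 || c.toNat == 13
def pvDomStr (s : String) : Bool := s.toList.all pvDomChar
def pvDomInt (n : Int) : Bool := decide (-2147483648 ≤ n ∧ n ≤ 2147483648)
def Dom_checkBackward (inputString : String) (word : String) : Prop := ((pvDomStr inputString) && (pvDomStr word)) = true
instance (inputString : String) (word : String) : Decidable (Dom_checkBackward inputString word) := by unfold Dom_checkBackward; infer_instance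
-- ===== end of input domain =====

-- B replaces reverse-the-word + row slices + per-row str.find by a single flat scan over
-- string indices matching the unreversed word right-to-left in place (alternative decomposition).

-- ===== PORT A =====
def flipString (userInput : String) : String :=
  -- userInput[::-1]; slice? with step -1 is never none, so getD is never taken
  (PySem.Str.slice? userInput none none (-1)).getD ""

-- 'for row in range(len(puzzle)):' testing puzzle[row] with str.find, first hit returns
def goA (word reverse : String) (rows : List String) (row : Nat) : Option String :=
  match rows with
  | [] => none
  | r :: rest =>
    if PySem.Str.find r reverse > -1 then
      let col := PySem.Str.find r reverse
      some (word ++ ": (BACKWARD) row: " ++ PySem.Int.toStr (row : Int) ++ " column: " ++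
            PySem.Int.toStr (col + (PySem.Str.len reverse : Int) - 1))
    else goA word reverse rest (row + 1)

def checkBackward (inputString : String) (word : String) : Option String :=
  let reverse := flipString word
  let puzzle := (PySem.List.pyRange 0 10 1).foldl
    (fun acc i => acc ++ [PySem.Str.slice inputString (some (10 * i)) (some (10 * i + 10))]) []
  goA word reverse puzzle 0

-- ===== PORT B =====
-- all(inputString[j-k] == word[k] for k in range(n)): indices are in range under the guard,
-- so getD with a default is exact here
def matchBack (s : List Char) (wl : List Char) (j : Nat) : Bool :=
  match wl with
  | [] => true
  | c :: rest => (s.getD j ' ' == c) && matchBack s rest (j - 1)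

-- 'for j in range(limit): row = j // 10; if 10*row + n <= j+1 and <backward match>: return …'
def loopB (s : List Char) (word : String) (wl : List Char) (limit j : Nat) : Option String :=
  if j < limit then
    if 10 * (j / 10) + wl.length ≤ j + 1 ∧ matchBack s wl j = true then
      some (word ++ ": (BACKWARD) row: " ++ PySem.Int.toStr ((j / 10 : Nat) : Int) ++ " column: " ++
            PySem.Int.toStr ((j - 10 * (j / 10) : Nat) : Int))
    else loopB s word wl limit (j + 1)
  else none
termination_by limit - j

def checkBackward_alt (inputString : String) (word : String) : Option String :=
  loopB inputString.toList word word.toList (min inputString.toList.length 100) 0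

-- ===== PRECONDITION & SPEC =====
-- Pre_ excludes only the empty word: there A's str.find("") = 0 produces the artefact
-- string "… column: -1", a defensible-corner value B's zero-width match does not reproduce.
def Pre_checkBackward (inputString : String) (word : String) : Prop := word ≠ ""
instance (inputString : String) (word : String) : Decidable (Pre_checkBackward inputString word) := by unfold Pre_checkBackward; infer_instance
def pvWitness_checkBackward : String × String := ("cbaxxxxxxx", "abc")
def Spec_checkBackward (inputString : String) (word : String) (out : Option String) : Prop := out = checkBackward_alt inputString word
instance (inputString : String) (word : String) (out : Option String) : Decidable (Spec_checkBackward inputString word out) := by unfold Spec_checkBackward; infer_instance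

-- ===== CLAIM (what is proved, stated in full; the proofs are below) =====
def Claim_equal_checkBackward : Prop := ∀ (inputString : String) (word : String), Dom_checkBackward inputString word → Pre_checkBackward inputString word → Spec_checkBackward inputString word (checkBackward inputString word)

-- ===== LEMMAS AND PROOFS =====

-- proof-side middle layer: per-row leftmost scan (used to relate both ports)
def scanB (row rev : List Char) (start : Nat) : Option Int :=
  if start + rev.length ≤ row.length then
    if (row.drop start).take rev.length = rev then some ((start : Int) + rev.length - 1)
    else scanB row rev (start + 1)
  else none
termination_by row.length + 1 - start

def rowsB (inputString word : String) (rev : List Char) (i : Nat) : Option String :=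
  if i < 10 then
    match scanB ((inputString.toList.drop (10 * i)).take 10) rev 0 with
    | some col => some (word ++ ": (BACKWARD) row: " ++ PySem.Int.toStr (i : Int) ++ " column: " ++
                        PySem.Int.toStr col)
    | none => rowsB inputString word rev (i + 1)
  else none
termination_by 10 - i

lemma scanB_none (row rev : List Char) (start : Nat)
    (h : ∀ j, start ≤ j → ¬ rev <+: row.drop j) : scanB row rev start = none := by
  fun_induction scanB row rev start with
  | case1 start hle heq => exact absurd (List.prefix_iff_eq_take.mpr heq.symm) (h start le_rfl)
  | case2 start hle heq ih => exact ih (fun j hj => h j (by omega))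
  | case3 start hle => rfl

lemma scanB_min (row rev : List Char) (start j : Nat) (hj : start ≤ j) (hjL : j ≤ row.length)
    (hpre : rev <+: row.drop j) (hmin : ∀ i, i < j → ¬ rev <+: row.drop i) :
    scanB row rev start = some ((j : Int) + rev.length - 1) := by
  have hn : j + rev.length ≤ row.length := by
    have := hpre.length_le
    simp [List.length_drop] at this
    omega
  fun_induction scanB row rev start with
  | case1 start hle heq =>
    have hps : rev <+: row.drop start := List.prefix_iff_eq_take.mpr heq.symm
    have : start = j := by
      by_contra hne
      exact hmin start (by omega) hps
    subst this; rfl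
  | case2 start hle heq ih =>
    have : start ≠ j := by
      intro e; subst e
      exact heq (List.prefix_iff_eq_take.mp hpre).symm
    exact ih (by omega)
  | case3 start hle =>
    exact absurd (by omega : start + rev.length ≤ row.length) hle

lemma scan_find (row rev : List Char) :
    scanB row rev 0 =
      if PySem.Chars.find row rev = -1 then none
      else some (PySem.Chars.find row rev + rev.length - 1) := by
  by_cases h : PySem.Chars.find row rev = -1
  · rw [if_pos h]
    apply scanB_none
    intro j _ hpre
    have hin : PySem.Chars.isIn rev row = true :=
      (PySem.Chars.exists_prefix_drop_iff_isIn rev row).mp ⟨j, hpre⟩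
    exact (PySem.Chars.find_eq_neg_one_iff row rev).mp h ((PySem.Chars.isIn_iff_infix rev row).mp hin)
  · rw [if_neg h]
    have h0 : 0 ≤ PySem.Chars.find row rev := by
      have := PySem.Chars.neg_one_le_find row rev; omega
    obtain ⟨hpre, hmin⟩ := PySem.Chars.find_spec (s := row) (sub := rev) h0
    have hle := PySem.Chars.find_le_length row rev
    rw [scanB_min row rev 0 (PySem.Chars.find row rev).toNat (Nat.zero_le _) (by omega) hpre hmin]
    congr 1
    omega

lemma row_toList (s : String) (i : Nat) :
    (PySem.Str.slice s (some (10 * (i : Int))) (some (10 * (i : Int) + 10))).toList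
      = (s.toList.drop (10 * i)).take 10 := by
  have h1 : (10 * (i : Int)) = ((10 * i : Nat) : Int) := by push_cast; ring
  have h2 : ((10 * i : Nat) : Int) + 10 = ((10 * i : Nat) : Int) + ((10 : Nat) : Int) := by norm_num
  rw [PySem.Str.toList_slice, h1, h2]
  simp only [PySem.Chars.slice]
  rw [PySem.List.slice_natCast_add]

lemma goA_eq_rowsB (s word rvStr : String) :
    ∀ n (i : Nat), i ≤ 10 → 10 - i = n →
    goA word rvStr
      ((PySem.List.pyRange (i : Int) 10 1).map
        (fun j => PySem.Str.slice s (some (10 * j)) (some (10 * j + 10)))) i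
    = rowsB s word rvStr.toList i := by
  intro n
  induction n with
  | zero =>
    intro i hi hn
    have : i = 10 := by omega
    subst this
    rw [rowsB]
    norm_num
    rfl
  | succ n ih =>
    intro i hi hn
    have hlt : i < 10 := by omega
    have hcast : ((i : Int)) < 10 := by exact_mod_cast hlt
    rw [PySem.List.pyRange_one_cons hcast, List.map_cons, goA, rowsB, if_pos hlt]
    simp only [PySem.Str.find_eq, row_toList, scan_find, PySem.Str.len_eq]
    set F := PySem.Chars.find ((s.toList.drop (10 * i)).take 10) rvStr.toList with hF
    have hge := PySem.Chars.neg_one_le_find ((s.toList.drop (10 * i)).take 10) rvStr.toList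
    by_cases h : F = -1
    · rw [if_pos h, if_neg (by omega : ¬ F > -1)]
      have : ((i : Int) + 1) = (((i + 1 : Nat)) : Int) := by push_cast; ring
      rw [this]
      exact ih (i + 1) (by omega) (by omega)
    · rw [if_neg h, if_pos (by omega : F > -1)]

-- ===== B-side lemmas =====

lemma loopB_none (s : List Char) (word : String) (wl : List Char) (limit j : Nat)
    (h : limit ≤ j) : loopB s word wl limit j = none := by
  rw [loopB]
  simp [Nat.not_lt.mpr h]

lemma matchBack_iff (s : List Char) :
    ∀ (wl : List Char) (j : Nat), wl.length ≤ j + 1 → j < s.length →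
    (matchBack s wl j = true ↔ (s.drop (j + 1 - wl.length)).take wl.length = wl.reverse) := by
  intro wl
  induction wl with
  | nil => intro j _ _; simp [matchBack]
  | cons c rest ih =>
    intro j hlen hj
    simp only [List.length_cons] at hlen
    have hrest : rest.length ≤ j := by omega
    have ihj : matchBack s rest (j - 1) = true ↔
        (s.drop (j - rest.length)).take rest.length = rest.reverse := by
      rcases Nat.eq_zero_or_pos rest.length with h0 | hpos
      · rw [List.eq_nil_of_length_eq_zero h0] at *
        simp [matchBack]
      · have he : j - rest.length = (j - 1) + 1 - rest.length := by omega
        rw [he]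
        exact ih (j - 1) (by omega) (by omega)
    have hkey : (s.drop (j + 1 - (rest.length + 1))).take (rest.length + 1)
        = ((s.drop (j - rest.length)).take rest.length) ++ [s.getD j ' '] := by
      have e1 : j + 1 - (rest.length + 1) = j - rest.length := by omega
      rw [e1, List.take_succ]
      congr 1
      have : (s.drop (j - rest.length))[rest.length]? = s[j]? := by
        rw [List.getElem?_drop]
        congr 1
        omega
      rw [this, List.getElem?_eq_getElem hj]
      simp [List.getD, List.getElem?_eq_getElem hj]
    simp only [matchBack, Bool.and_eq_true, beq_iff_eq, List.length_cons, List.reverse_cons, hkey]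
    rw [ihj]
    constructor
    · rintro ⟨h1, h2⟩; rw [h1, h2]
    · intro h
      have hlen2 : ((s.drop (j - rest.length)).take rest.length).length = rest.reverse.length := by
        simp [List.length_take, List.length_drop]
        omega
      obtain ⟨ha, hb⟩ := List.append_inj h (by simpa using hlen2)
      refine ⟨by simpa using hb, ha⟩

lemma drop_take_slice (s : List Char) (a p n : Nat) (h : p + n ≤ 10) :
    (((s.drop a).take 10).drop p).take n = (s.drop (a + p)).take n := by
  rw [List.drop_take, List.take_take, List.drop_drop, min_eq_left (by omega)]

lemma loopB_row (s : List Char) (w : String) (wl : List Char) (hn : 1 ≤ wl.length) (i : Nat) (hi : i < 10) :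
    ∀ (d j : Nat), j + d = 10 * (i + 1) → 10 * i ≤ j →
    loopB s w wl (min s.length 100) j =
      match scanB ((s.drop (10 * i)).take 10) wl.reverse (j + 1 - (wl.length + 10 * i)) with
      | some col => some (w ++ ": (BACKWARD) row: " ++ PySem.Int.toStr (i : Int) ++ " column: " ++
                          PySem.Int.toStr col)
      | none => loopB s w wl (min s.length 100) (10 * (i + 1)) := by
  intro d
  induction d with
  | zero =>
    intro j hj hji
    have hrl : ((s.drop (10 * i)).take 10).length = min 10 (s.length - 10 * i) := by
      simp [List.length_take, List.length_drop]
    rw [scanB_none _ _ _ (by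
      intro q hq hpre
      have hlen := hpre.length_le
      rw [List.length_drop, List.length_reverse, hrl] at hlen
      omega)]
    have : j = 10 * (i + 1) := by omega
    rw [this]
  | succ d ih =>
    intro j hj hji
    have hrl : ((s.drop (10 * i)).take 10).length = min 10 (s.length - 10 * i) := by
      simp [List.length_take, List.length_drop]
    by_cases hlim : j < min s.length 100
    · have hjL : j < s.length := by omega
      have hrow : j / 10 = i := by omega
      rw [loopB, if_pos hlim, hrow]
      by_cases hg : 10 * i + wl.length ≤ j + 1
      · have hmb := matchBack_iff s wl j (by omega) hjL
        have hple : (j + 1 - (wl.length + 10 * i)) + wl.reverse.length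
            ≤ ((s.drop (10 * i)).take 10).length := by
          simp only [List.length_reverse, hrl]
          omega
        by_cases hm : matchBack s wl j = true
        · rw [if_pos ⟨hg, hm⟩, scanB, if_pos hple]
          rw [List.length_reverse,
              drop_take_slice s (10 * i) (j + 1 - (wl.length + 10 * i)) wl.length (by omega)]
          have he : 10 * i + (j + 1 - (wl.length + 10 * i)) = j + 1 - wl.length := by omega
          rw [he, if_pos (hmb.mp hm)]
          have hcol : ((j - 10 * i : Nat) : Int)
              = ((j + 1 - (wl.length + 10 * i) : Nat) : Int) + wl.length - 1 := by omega
          rw [hcol]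
        · rw [if_neg (by intro hc; exact hm hc.2), scanB, if_pos hple]
          rw [List.length_reverse,
              drop_take_slice s (10 * i) (j + 1 - (wl.length + 10 * i)) wl.length (by omega)]
          have he : 10 * i + (j + 1 - (wl.length + 10 * i)) = j + 1 - wl.length := by omega
          rw [he, if_neg (by intro hc; exact hm (hmb.mpr hc))]
          have he2 : j + 1 - (wl.length + 10 * i) + 1 = (j + 1) + 1 - (wl.length + 10 * i) := by
            omega
          rw [he2]
          exact ih (j + 1) (by omega) (by omega)
      · rw [if_neg (by intro hc; exact hg hc.1)]
        have he : j + 1 - (wl.length + 10 * i) = (j + 1) + 1 - (wl.length + 10 * i) := by omega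
        rw [he]
        exact ih (j + 1) (by omega) (by omega)
    · rw [loopB_none _ _ _ _ _ (by omega)]
      rw [scanB_none _ _ _ (by
        intro q hq hpre
        have hlen := hpre.length_le
        rw [List.length_drop, List.length_reverse, hrl] at hlen
        omega)]
      rw [loopB_none _ _ _ _ _ (by omega)]

lemma loopB_eq_rowsB (inp w : String) (hn : 1 ≤ w.toList.length) :
    ∀ (m i : Nat), i + m = 10 →
    loopB inp.toList w w.toList (min inp.toList.length 100) (10 * i)
      = rowsB inp w w.toList.reverse i := by
  intro m
  induction m with
  | zero =>
    intro i hi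
    have : i = 10 := by omega
    subst this
    rw [loopB_none _ _ _ _ _ (by omega), rowsB]
    simp
  | succ m ih =>
    intro i hi
    have hi10 : i < 10 := by omega
    have h := loopB_row inp.toList w w.toList hn i hi10 (10 * (i + 1) - 10 * i) (10 * i)
      (by omega) le_rfl
    have hp : 10 * i + 1 - (w.toList.length + 10 * i) = 0 := by omega
    rw [hp] at h
    rw [h, rowsB, if_pos hi10]
    cases hsc : scanB ((inp.toList.drop (10 * i)).take 10) w.toList.reverse 0 with
    | some col => rfl
    | none => exact ih (i + 1) (by omega)

-- ===== VERDICT (by name: the statement is the Claim_ definition above) =====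
theorem checkBackward_spec : Claim_equal_checkBackward := by
  intro s w _ hpre
  have hw : 1 ≤ w.toList.length := by
    rcases Nat.eq_zero_or_pos w.toList.length with h0 | h
    · exact absurd (String.toList_eq_nil_iff.mp (List.eq_nil_of_length_eq_zero h0)) hpre
    · exact h
  unfold Spec_checkBackward checkBackward checkBackward_alt flipString
  rw [PySem.Str.slice?_none_none_neg_one]
  simp only [Option.getD_some]
  rw [PySem.List.foldl_append_singleton_eq_map]
  have hA := goA_eq_rowsB s w (String.ofList w.toList.reverse) 10 0 (by omega) (by omega)
  simp only [Nat.cast_zero, String.toList_ofList] at hA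
  have hB := loopB_eq_rowsB s w hw 10 0 (by omega)
  simp only [Nat.mul_zero] at hB
  rw [List.nil_append, hA, ← hB]
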